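-- pv_equiv track=rewrite | github.com/blanchefort/freyrmonitoring | freyr_app/core/processing/clustering.py | rearrange_list
-- ===== SOURCE A (Python) =====
-- def rearrange_list(lst, to_remove):
--     '''Удаляем из списка индексы уже кластеризованных материалов
--     '''
--     new_lst = []
--     for idx, content in enumerate(lst):
--         if idx in to_remove:
--             new_lst.append([])
--         else:
--             new_lst.append(content)
--     return new_lst
-- ===== SOURCE B (Python) =====
-- def rearrange_list(lst, to_remove):
--     '''Удаляем из списка индексы уже кластеризованных материалов
--     '''
--     new_lst = list(lst)
--     for idx in to_remove:
--         if 0 <= idx < len(new_lst):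
--             new_lst[idx] = []
--     return new_lst
-- ===== Notes on version B (the rewrite author's own statement) =====
-- stated objective: alternative
-- what changed: B shallow-copies lst once and loops over to_remove assigning [] at each in-range index, instead of scanning to_remove for every element of lst.
import Mathlib
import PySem

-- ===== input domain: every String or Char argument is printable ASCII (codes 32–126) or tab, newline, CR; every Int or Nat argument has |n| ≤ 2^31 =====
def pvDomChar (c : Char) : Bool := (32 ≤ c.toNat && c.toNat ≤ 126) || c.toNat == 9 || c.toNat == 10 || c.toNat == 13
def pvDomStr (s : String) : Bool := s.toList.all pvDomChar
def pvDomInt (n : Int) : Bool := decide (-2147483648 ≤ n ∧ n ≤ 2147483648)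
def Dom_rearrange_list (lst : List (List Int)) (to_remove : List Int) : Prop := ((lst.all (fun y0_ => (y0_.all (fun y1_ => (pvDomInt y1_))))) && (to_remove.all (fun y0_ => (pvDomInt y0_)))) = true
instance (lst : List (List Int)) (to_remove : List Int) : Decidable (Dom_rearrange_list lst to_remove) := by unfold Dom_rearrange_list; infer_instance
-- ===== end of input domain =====

-- B replaces A's per-element membership scan by a single shallow copy plus direct
-- assignment at each in-range index of to_remove (alternative decomposition).

-- ===== PORT A =====
-- for idx, content in enumerate(lst): append [] if idx in to_remove else content
def rearrange_list (lst : List (List Int)) (to_remove : List Int) : List (List Int) :=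
  (PySem.List.enumerate lst).foldl
    (fun new_lst p => if p.1 ∈ to_remove then new_lst ++ [[]] else new_lst ++ [p.2]) []

-- ===== PORT B =====
-- new_lst = list(lst); for idx in to_remove: if 0 <= idx < len(new_lst): new_lst[idx] = []
def rearrange_list_alt (lst : List (List Int)) (to_remove : List Int) : List (List Int) :=
  to_remove.foldl
    (fun new_lst idx =>
      if 0 ≤ idx ∧ idx < (new_lst.length : Int) then new_lst.set idx.toNat [] else new_lst) lst

-- ===== PRECONDITION & SPEC =====
def Spec_rearrange_list (lst : List (List Int)) (to_remove : List Int) (out : List (List Int)) : Prop := out = rearrange_list_alt lst to_remove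
instance (lst : List (List Int)) (to_remove : List Int) (out : List (List Int)) : Decidable (Spec_rearrange_list lst to_remove out) := by unfold Spec_rearrange_list; infer_instance

-- ===== CLAIM (what is proved, stated in full; the proofs are below) =====
def Claim_equal_rearrange_list : Prop := ∀ (lst : List (List Int)) (to_remove : List Int), Dom_rearrange_list lst to_remove → Spec_rearrange_list lst to_remove (rearrange_list lst to_remove)

-- ===== LEMMAS AND PROOFS =====

-- The A-side fold just appends one element per enumerated pair.
theorem rearrange_list_eq_map (tr : List Int) :
    ∀ (l : List (Int × List Int)) (init : List (List Int)),
      l.foldl (fun acc p => if p.1 ∈ tr then acc ++ [[]] else acc ++ [p.2]) init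
        = init ++ l.map (fun p => if p.1 ∈ tr then [] else p.2) := by
  intro l
  induction l with
  | nil => intro init; simp
  | cons p l ih =>
    intro init
    simp only [List.foldl_cons, List.map_cons]
    rw [ih]
    by_cases h : p.1 ∈ tr <;> simp [h]

theorem alt_length (tr : List Int) :
    ∀ (acc : List (List Int)),
      (tr.foldl (fun new_lst idx =>
          if 0 ≤ idx ∧ idx < (new_lst.length : Int) then new_lst.set idx.toNat [] else new_lst) acc).length
        = acc.length := by
  induction tr with
  | nil => intro acc; rfl
  | cons t tr ih =>
    intro acc
    simp only [List.foldl_cons]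
    rw [ih]
    by_cases h : 0 ≤ t ∧ t < (acc.length : Int) <;> simp [h]

theorem alt_get (tr : List Int) :
    ∀ (acc : List (List Int)) (i : Nat) (hi : i < acc.length),
      (tr.foldl (fun new_lst idx =>
          if 0 ≤ idx ∧ idx < (new_lst.length : Int) then new_lst.set idx.toNat [] else new_lst) acc)[i]'
        (by rw [alt_length]; exact hi)
        = if (i : Int) ∈ tr then [] else acc[i] := by
  induction tr with
  | nil => intro acc i hi; simp
  | cons t tr ih =>
    intro acc i hi
    simp only [List.foldl_cons]
    by_cases ht : 0 ≤ t ∧ t < (acc.length : Int)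
    · have hlen : i < (acc.set t.toNat []).length := by simpa using hi
      simp only [if_pos ht]
      rw [ih (acc.set t.toNat []) i hlen]
      by_cases hmem : (i : Int) ∈ tr
      · simp [hmem]
      · by_cases hti : t = (i : Int)
        · have h1 : t.toNat = i := by omega
          simp [hmem, hti]
        · have h2 : t.toNat ≠ i := by omega
          have h3 : ¬ ((i : Int) = t) := fun h => hti h.symm
          simp [List.mem_cons, hmem, h3, h2]
    · simp only [if_neg ht]
      rw [ih acc i hi]
      have h3 : ¬ ((i : Int) = t) := by omega
      simp [List.mem_cons, h3]

-- ===== VERDICT (by name: the statement is the Claim_ definition above) =====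
theorem rearrange_list_spec : Claim_equal_rearrange_list := by
  intro lst tr _
  unfold Spec_rearrange_list rearrange_list rearrange_list_alt
  rw [rearrange_list_eq_map, List.nil_append]
  apply List.ext_getElem
  · rw [alt_length]; simp [PySem.List.length_enumerate]
  · intro i h1 h2
    have hi : i < lst.length := by
      have := h1; simpa [PySem.List.length_enumerate] using this
    rw [alt_get tr lst i hi]
    simp [PySem.List.getElem_enumerate]
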